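-- pv_equiv track=rewrite | github.com/paramkushamphanisai/Algorithems | hw3.py | BuildMaxHeap
-- ===== SOURCE A (Python) =====
-- def MaxHeap(array,length,index):
--     #initilize the maxi value index
--     maxi=index
--     # Compute the values for left and right child elements
--     left=2*index+1
--     right=2*index+2
--     # check the max element of left and right element
--     if left < length:
--         if array[left]>array[maxi]:
--             maxi=left
--     if right < length:
--         if array[right]>array[maxi]:
--             maxi=right
--     # Swap the max element and element at the current index of the array if index is not with max element
--     if maxi!=index:
--         tmp=array[maxi]
--         array[maxi]=array[index]
--         array[index]=tmp
--         MaxHeap(array,length,maxi)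
--
-- def BuildMaxHeap(array,length):
--     #construct the max heap first max element
--     n=length//2-1
--     for index in range(n,-1,-1):
--         MaxHeap(array,length,index)
--     m=length-1
--     #construct the max heap for the second max elements
--     for indexi in range(m,0,-1):
--         tmp=array[0]
--         array[0]=array[indexi]
--         array[indexi]=tmp
--         MaxHeap(array,indexi,0)
--     return array
-- ===== SOURCE B (Python) =====
-- def _siftdown(array, size, root):
--     # iterative sift-down: walk the larger-child path until the heap property holds
--     i = root
--     while True:
--         m = i
--         l = 2 * i + 1
--         r = 2 * i + 2
--         if l < size and array[l] > array[m]: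
--             m = l
--         if r < size and array[r] > array[m]:
--             m = r
--         if m == i:
--             return
--         array[i], array[m] = array[m], array[i]
--         i = m
--
-- def BuildMaxHeap(array, length):
--     for i in reversed(range(length // 2)):
--         _siftdown(array, length, i)
--     for end in reversed(range(1, length)):
--         array[0], array[end] = array[end], array[0]
--         _siftdown(array, end, 0)
--     return array
-- ===== Notes on version B (the rewrite author's own statement) =====
-- stated objective: idiomatic
-- what changed: The recursive MaxHeap helper is replaced by an iterative sift-down (a single while loop walking the larger-child path), and the two driver loops are written with reversed(range(...)); same in-place heapsort, no recursion.
import Mathlib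
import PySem

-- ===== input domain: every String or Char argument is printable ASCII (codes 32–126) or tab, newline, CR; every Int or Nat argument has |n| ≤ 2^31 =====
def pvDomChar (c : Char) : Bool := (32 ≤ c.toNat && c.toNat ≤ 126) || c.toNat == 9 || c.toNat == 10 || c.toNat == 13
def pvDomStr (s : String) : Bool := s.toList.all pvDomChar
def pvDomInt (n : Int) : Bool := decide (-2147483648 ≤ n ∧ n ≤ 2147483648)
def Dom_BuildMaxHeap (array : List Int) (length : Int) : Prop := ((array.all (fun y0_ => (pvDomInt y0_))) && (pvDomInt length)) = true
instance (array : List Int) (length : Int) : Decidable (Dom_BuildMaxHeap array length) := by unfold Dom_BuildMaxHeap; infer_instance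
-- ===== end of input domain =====

-- B replaces the recursive MaxHeap helper with an iterative sift-down loop (idiomatic, no recursion);
-- in Python both A and B mutate `array` in place — the equivalence proved here is about the return value.

-- ===== PORT A =====
-- Recursive MaxHeap; indexing/assignment use pyGetD/pySetD (exact under Pre_, where every index
-- reached is nonnegative and in range).  The recursion is bounded by `fuel`; every call below
-- passes enough fuel, since the heap index strictly grows and stays below `length`.
def MaxHeapPy (array : List Int) (length index : Int) : Nat → List Int
  | 0 => array
  | fuel + 1 =>
    let maxi := index
    let left := 2 * index + 1
    let right := 2 * index + 2
    let maxi := if left < length then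
        (if PySem.List.pyGetD array left 0 > PySem.List.pyGetD array maxi 0 then left else maxi)
      else maxi
    let maxi := if right < length then
        (if PySem.List.pyGetD array right 0 > PySem.List.pyGetD array maxi 0 then right else maxi)
      else maxi
    if maxi ≠ index then
      let tmp := PySem.List.pyGetD array maxi 0
      let a1 := PySem.List.pySetD array maxi (PySem.List.pyGetD array index 0)
      let a2 := PySem.List.pySetD a1 index tmp
      MaxHeapPy a2 length maxi fuel
    else array

def BuildMaxHeap (array : List Int) (length : Int) : List Int :=
  let n := PySem.Int.floordiv length 2 - 1
  let arr1 := (PySem.List.pyRange n (-1) (-1)).foldl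
    (fun a index => MaxHeapPy a length index (length.toNat + 1)) array
  let m := length - 1
  (PySem.List.pyRange m 0 (-1)).foldl
    (fun a indexi =>
      let tmp := PySem.List.pyGetD a 0 0
      let a1 := PySem.List.pySetD a 0 (PySem.List.pyGetD a indexi 0)
      let a2 := PySem.List.pySetD a1 indexi tmp
      MaxHeapPy a2 indexi 0 (indexi.toNat + 1)) arr1

-- ===== PORT B =====
-- Iterative sift-down: one loop walking the larger-child path (state = current index i); the
-- `while True` loop is the fuelled tail recursion `siftLoop` (same fuel bound as port A's calls).
def siftLoop (array : List Int) (size i : Int) : Nat → List Int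
  | 0 => array
  | fuel + 1 =>
    let l := 2 * i + 1
    let r := 2 * i + 2
    let m := if l < size ∧ PySem.List.pyGetD array l 0 > PySem.List.pyGetD array i 0 then l else i
    let m := if r < size ∧ PySem.List.pyGetD array r 0 > PySem.List.pyGetD array m 0 then r else m
    if m = i then array
    else
      let arr' := PySem.List.pySetD (PySem.List.pySetD array i (PySem.List.pyGetD array m 0)) m
        (PySem.List.pyGetD array i 0)
      siftLoop arr' size m fuel

def BuildMaxHeap_alt (array : List Int) (length : Int) : List Int :=
  let built := ((List.range (PySem.Int.floordiv length 2).toNat).reverse).foldl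
    (fun a (i : Nat) => siftLoop a length (i : Int) (length.toNat + 1)) array
  ((List.range' 1 (length - 1).toNat).reverse).foldl
    (fun a (e : Nat) =>
      let a' := PySem.List.pySetD (PySem.List.pySetD a 0 (PySem.List.pyGetD a (e : Int) 0)) (e : Int)
        (PySem.List.pyGetD a 0 0)
      siftLoop a' (e : Int) 0 (Int.toNat (e : Int) + 1)) built

-- ===== PRECONDITION & SPEC =====
-- Pre_ excludes exactly the inputs where A raises IndexError: length ≥ 2 together with
-- length > len(array) makes the heap loops index past the end of the list (B raises there too).
def Pre_BuildMaxHeap (array : List Int) (length : Int) : Prop :=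
  length ≤ (array.length : Int) ∨ length < 2
instance (array : List Int) (length : Int) : Decidable (Pre_BuildMaxHeap array length) := by
  unfold Pre_BuildMaxHeap; infer_instance

def pvWitness_BuildMaxHeap : List Int × Int := ([5, 1, 4, 2, 3], 5)

def Spec_BuildMaxHeap (array : List Int) (length : Int) (out : List Int) : Prop := out = BuildMaxHeap_alt array length
instance (array : List Int) (length : Int) (out : List Int) : Decidable (Spec_BuildMaxHeap array length out) := by unfold Spec_BuildMaxHeap; infer_instance

-- ===== CLAIM (what is proved, stated in full; the proofs are below) =====
def Claim_equal_BuildMaxHeap : Prop := ∀ (array : List Int) (length : Int), Dom_BuildMaxHeap array length → Pre_BuildMaxHeap array length → Spec_BuildMaxHeap array length (BuildMaxHeap array length)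

-- ===== LEMMAS AND PROOFS =====

-- A's swap (tmp; write maxi; write index) and B's swap (write i, then m) build the same list.
lemma swap_comm (a : List Int) (i m : Int) (hi : 0 ≤ i) (hm : 0 ≤ m) (hne : m ≠ i) :
    PySem.List.pySetD (PySem.List.pySetD a m (PySem.List.pyGetD a i 0)) i (PySem.List.pyGetD a m 0)
      = PySem.List.pySetD (PySem.List.pySetD a i (PySem.List.pyGetD a m 0)) m (PySem.List.pyGetD a i 0) := by
  rw [PySem.List.pySetD_of_nonneg _ _ hm, PySem.List.pySetD_of_nonneg _ _ hi,
      PySem.List.pySetD_of_nonneg _ _ hi, PySem.List.pySetD_of_nonneg _ _ hm]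
  exact (List.set_comm _ _ (by omega)).symm

-- The recursive and the iterative sift-down agree for a nonnegative start index (any fuel).
lemma sift_eq (fuel : Nat) : ∀ (a : List Int) (n i : Int), 0 ≤ i →
    MaxHeapPy a n i fuel = siftLoop a n i fuel := by
  induction fuel with
  | zero => intro a n i _; rfl
  | succ f ih =>
    intro a n i hi
    have hlne : (2 * i + 1 : Int) ≠ i := by omega
    have hrne : (2 * i + 2 : Int) ≠ i := by omega
    by_cases hl : 2 * i + 1 < n
    · by_cases hcl : PySem.List.pyGetD a (2 * i + 1) 0 > PySem.List.pyGetD a i 0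
      · by_cases hr : 2 * i + 2 < n
        · by_cases hcr : PySem.List.pyGetD a (2 * i + 2) 0 > PySem.List.pyGetD a (2 * i + 1) 0
          · simp only [MaxHeapPy, siftLoop, if_pos hl, if_pos hcl, if_pos hr, if_pos hcr,
              if_pos (And.intro hl hcl), if_pos (And.intro hr hcr), if_pos hrne, if_neg hrne]
            rw [swap_comm a i _ hi (by omega) hrne]
            exact ih _ n _ (by omega)
          · simp only [MaxHeapPy, siftLoop, if_pos hl, if_pos hcl, if_pos hr, if_neg hcr,
              if_pos (And.intro hl hcl), if_neg (fun h : _ ∧ _ => hcr h.2),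
              if_pos hlne, if_neg hlne]
            rw [swap_comm a i _ hi (by omega) hlne]
            exact ih _ n _ (by omega)
        · simp only [MaxHeapPy, siftLoop, if_pos hl, if_pos hcl, if_neg hr,
            if_pos (And.intro hl hcl), if_neg (fun h : _ ∧ _ => hr h.1),
            if_pos hlne, if_neg hlne]
          rw [swap_comm a i _ hi (by omega) hlne]
          exact ih _ n _ (by omega)
      · by_cases hr : 2 * i + 2 < n
        · by_cases hcr : PySem.List.pyGetD a (2 * i + 2) 0 > PySem.List.pyGetD a i 0
          · simp only [MaxHeapPy, siftLoop, if_pos hl, if_neg hcl, if_pos hr, if_pos hcr,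
              if_neg (fun h : _ ∧ _ => hcl h.2), if_pos (And.intro hr hcr),
              if_pos hrne, if_neg hrne]
            rw [swap_comm a i _ hi (by omega) hrne]
            exact ih _ n _ (by omega)
          · simp [MaxHeapPy, siftLoop, hl, hcl, hr, hcr]
        · simp [MaxHeapPy, siftLoop, hl, hcl, hr]
    · by_cases hr : 2 * i + 2 < n
      · by_cases hcr : PySem.List.pyGetD a (2 * i + 2) 0 > PySem.List.pyGetD a i 0
        · simp only [MaxHeapPy, siftLoop, if_neg hl, if_pos hr, if_pos hcr,
            if_neg (fun h : _ ∧ _ => hl h.1), if_pos (And.intro hr hcr),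
            if_pos hrne, if_neg hrne]
          rw [swap_comm a i _ hi (by omega) hrne]
          exact ih _ n _ (by omega)
        · simp [MaxHeapPy, siftLoop, hl, hr, hcr]
      · simp [MaxHeapPy, siftLoop, hl, hr]

-- A's countdown range(q-1, -1, -1) is B's reversed(range(q)) read as Ints.
lemma build_range_eq (q : Int) :
    PySem.List.pyRange (q - 1) (-1) (-1) = ((List.range q.toNat).reverse).map (fun i : Nat => (i : Int)) := by
  rw [PySem.List.pyRange_neg_one]
  conv_rhs => rw [List.range_eq_range', List.reverse_range']
  rw [List.map_map]
  have h : (q - 1 - (-1)).toNat = q.toNat := by omega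
  rw [h]
  refine List.map_congr_left ?_
  intro k hk
  rw [List.mem_range] at hk
  simp only [Function.comp]
  omega

-- A's countdown range(length-1, 0, -1) is B's reversed(range(1, length)) read as Ints.
lemma extract_range_eq (length : Int) :
    PySem.List.pyRange (length - 1) 0 (-1)
      = ((List.range' 1 (length - 1).toNat).reverse).map (fun j : Nat => (j : Int)) := by
  rw [PySem.List.pyRange_neg_one, List.reverse_range', List.map_map]
  have h : (length - 1 - 0).toNat = (length - 1).toNat := by omega
  rw [h]
  refine List.map_congr_left ?_
  intro k hk
  rw [List.mem_range] at hk
  simp only [Function.comp]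
  omega

-- ===== VERDICT (by name: the statement is the Claim_ definition above) =====
theorem BuildMaxHeap_spec : Claim_equal_BuildMaxHeap := by
  intro array length _ _
  unfold Spec_BuildMaxHeap BuildMaxHeap BuildMaxHeap_alt
  simp only []
  rw [build_range_eq, List.foldl_map, extract_range_eq, List.foldl_map]
  have hbuilt :
      ((List.range (PySem.Int.floordiv length 2).toNat).reverse).foldl
          (fun a (i : Nat) => MaxHeapPy a length (i : Int) (length.toNat + 1)) array
        = ((List.range (PySem.Int.floordiv length 2).toNat).reverse).foldl
          (fun a (i : Nat) => siftLoop a length (i : Int) (length.toNat + 1)) array := by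
    have hf : (fun a (i : Nat) => MaxHeapPy a length (i : Int) (length.toNat + 1))
        = (fun a (i : Nat) => siftLoop a length (i : Int) (length.toNat + 1)) := by
      funext a i
      exact sift_eq _ a length (i : Int) (by positivity)
    rw [hf]
  rw [hbuilt]
  have hg : (fun a (j : Nat) =>
        let tmp := PySem.List.pyGetD a 0 0
        let a1 := PySem.List.pySetD a 0 (PySem.List.pyGetD a (j : Int) 0)
        let a2 := PySem.List.pySetD a1 (j : Int) tmp
        MaxHeapPy a2 (j : Int) 0 ((j : Int).toNat + 1))
      = (fun a (j : Nat) =>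
        let a' := PySem.List.pySetD (PySem.List.pySetD a 0 (PySem.List.pyGetD a (j : Int) 0)) (j : Int)
          (PySem.List.pyGetD a 0 0)
        siftLoop a' (j : Int) 0 (Int.toNat (j : Int) + 1)) := by
    funext a j
    simp only []
    rw [sift_eq _ _ _ 0 le_rfl]
  rw [hg]
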